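-- pv_equiv track=rewrite | github.com/aarnphm/monpy | python/monpy/__init__.py | _pad_axis_indices
-- ===== SOURCE A (Python) =====
-- def _pad_axis_indices(n:int, pre:int, post:int, mode:str)->list[int]:
--   if pre<0 or post<0:raise ValueError("pad: index can't contain negative values")
--   if pre==0 and post==0:return list(range(n))
--   if n<=0:raise ValueError(f"{mode}: can't extend empty axis")
--   if mode=="edge":return [0]*pre+list(range(n))+[n-1]*post
--   if mode=="wrap":return [p%n for p in range(-pre, n+post)]
--   if mode=="symmetric":
--     period=2*n
--     return [(m if m<n else period-1-m) for m in (p%period for p in range(-pre, n+post))]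
--   if mode=="reflect":
--     if n<=1:raise ValueError("reflect: axis size must be >= 2")
--     period=2*n-2
--     return [(m if m<n else period-m) for m in (p%period for p in range(-pre, n+post))]
--   raise NotImplementedError(f"pad mode={mode!r} not implemented")
-- ===== SOURCE B (Python) =====
-- def _pad_axis_indices(n: int, pre: int, post: int, mode: str) -> list[int]:
--     if pre < 0 or post < 0:
--         raise ValueError("pad: index can't contain negative values")
--     if pre == 0 and post == 0:
--         return list(range(n))
--     if n <= 0:
--         raise ValueError(f"{mode}: can't extend empty axis")
--     if mode == "edge":
--         return [0] * pre + list(range(n)) + [n - 1] * post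
--     center = list(range(n))
--     if mode == "wrap":
--         pattern = center
--     elif mode == "symmetric":
--         pattern = center + list(reversed(center))
--     elif mode == "reflect":
--         if n <= 1:
--             raise ValueError("reflect: axis size must be >= 2")
--         pattern = center + list(reversed(center[1:n - 1]))
--     else:
--         raise NotImplementedError(f"pad mode={mode!r} not implemented")
--     period = len(pattern)
--     start = (-pre) % period
--     total = pre + n + post
--     reps = (start + total + period - 1) // period
--     tiled = pattern * reps
--     return tiled[start:start + total]
-- ===== Notes on version B (the rewrite author's own statement) =====
-- stated objective: alternative
-- what changed: For the periodic modes (wrap/symmetric/reflect) B builds the explicit one-period index pattern once, tiles it, and slices the padded window out of the tiled list, instead of A's per-position modular-arithmetic comprehension.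
import Mathlib
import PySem

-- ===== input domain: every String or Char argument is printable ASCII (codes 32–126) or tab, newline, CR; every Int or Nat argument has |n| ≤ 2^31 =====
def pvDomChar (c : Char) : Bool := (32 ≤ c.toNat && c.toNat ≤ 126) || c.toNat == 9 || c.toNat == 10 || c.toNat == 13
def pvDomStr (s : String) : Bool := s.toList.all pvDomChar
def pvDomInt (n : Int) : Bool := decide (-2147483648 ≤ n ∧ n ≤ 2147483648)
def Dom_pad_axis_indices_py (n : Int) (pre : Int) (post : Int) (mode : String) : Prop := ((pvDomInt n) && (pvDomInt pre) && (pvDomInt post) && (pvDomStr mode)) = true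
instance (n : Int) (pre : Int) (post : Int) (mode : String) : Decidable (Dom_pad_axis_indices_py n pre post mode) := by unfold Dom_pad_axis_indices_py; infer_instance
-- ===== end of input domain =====

-- B replaces the per-position modular-index comprehensions of the periodic pad modes by
-- building one explicit period pattern, tiling it, and slicing the padded window out of the
-- tiled list (objective: alternative algorithm of similar cost).


-- ===== PORT A =====
-- Literal transliteration of _pad_axis_indices; the raising paths (excluded by Pre_) return [].
def pad_axis_indices_py (n : Int) (pre : Int) (post : Int) (mode : String) : List Int :=
  if pre < 0 ∨ post < 0 then []          -- raise ValueError
  else if pre = 0 ∧ post = 0 then PySem.List.pyRange 0 n 1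
  else if n ≤ 0 then []                   -- raise ValueError
  else if mode = "edge" then
    PySem.List.pyRepeat [0] pre ++ PySem.List.pyRange 0 n 1 ++ PySem.List.pyRepeat [n - 1] post
  else if mode = "wrap" then
    (PySem.List.pyRange (-pre) (n + post) 1).map (fun p => PySem.Int.mod p n)
  else if mode = "symmetric" then
    let period := 2 * n
    ((PySem.List.pyRange (-pre) (n + post) 1).map (fun p => PySem.Int.mod p period)).map
      (fun m => if m < n then m else period - 1 - m)
  else if mode = "reflect" then
    if n ≤ 1 then []                      -- raise ValueError
    else
      let period := 2 * n - 2
      ((PySem.List.pyRange (-pre) (n + post) 1).map (fun p => PySem.Int.mod p period)).map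
        (fun m => if m < n then m else period - m)
  else []                                 -- raise NotImplementedError

-- ===== PORT B =====
-- shared tail of B: tile the period pattern and slice the padded window out of it
def pvTileSlice (pattern : List Int) (pre : Int) (total : Int) : List Int :=
  let period : Int := pattern.length
  let start := PySem.Int.mod (-pre) period
  let reps := PySem.Int.floordiv (start + total + period - 1) period
  let tiled := PySem.List.pyRepeat pattern reps
  PySem.List.slice tiled (some start) (some (start + total))

def pad_axis_indices_py_alt (n : Int) (pre : Int) (post : Int) (mode : String) : List Int :=
  if pre < 0 ∨ post < 0 then []
  else if pre = 0 ∧ post = 0 then PySem.List.pyRange 0 n 1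
  else if n ≤ 0 then []
  else if mode = "edge" then
    PySem.List.pyRepeat [0] pre ++ PySem.List.pyRange 0 n 1 ++ PySem.List.pyRepeat [n - 1] post
  else
    let center := PySem.List.pyRange 0 n 1
    if mode = "wrap" then pvTileSlice center pre (pre + n + post)
    else if mode = "symmetric" then pvTileSlice (center ++ center.reverse) pre (pre + n + post)
    else if mode = "reflect" then
      if n ≤ 1 then []
      else pvTileSlice (center ++ (PySem.List.slice center (some 1) (some (n - 1))).reverse) pre (pre + n + post)
    else []

-- ===== PRECONDITION & SPEC =====
-- Pre_ excludes exactly A's raising paths: negative pre/post (ValueError), n ≤ 0 with nonzero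
-- padding (ValueError), reflect with n < 2 (ValueError), and unknown modes (NotImplementedError).
def Pre_pad_axis_indices_py (n : Int) (pre : Int) (post : Int) (mode : String) : Prop :=
  0 ≤ pre ∧ 0 ≤ post ∧ (¬(pre = 0 ∧ post = 0) →
    0 < n ∧ (mode = "edge" ∨ mode = "wrap" ∨ mode = "symmetric" ∨ (mode = "reflect" ∧ 2 ≤ n)))
instance (n : Int) (pre : Int) (post : Int) (mode : String) : Decidable (Pre_pad_axis_indices_py n pre post mode) := by unfold Pre_pad_axis_indices_py; infer_instance

def pvWitness_pad_axis_indices_py : Int × Int × Int × String := (3, 2, 2, "reflect")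

def Spec_pad_axis_indices_py (n : Int) (pre : Int) (post : Int) (mode : String) (out : List Int) : Prop := out = pad_axis_indices_py_alt n pre post mode
instance (n : Int) (pre : Int) (post : Int) (mode : String) (out : List Int) : Decidable (Spec_pad_axis_indices_py n pre post mode out) := by unfold Spec_pad_axis_indices_py; infer_instance

-- ===== CLAIM (what is proved, stated in full; the proofs are below) =====
def Claim_equal_pad_axis_indices_py : Prop := ∀ (n : Int) (pre : Int) (post : Int) (mode : String), Dom_pad_axis_indices_py n pre post mode → Pre_pad_axis_indices_py n pre post mode → Spec_pad_axis_indices_py n pre post mode (pad_axis_indices_py n pre post mode)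

-- ===== LEMMAS AND PROOFS =====

lemma length_flatten_replicate {α : Type} (P : List α) (r : Nat) :
    ((List.replicate r P).flatten).length = r * P.length := by
  simp [List.length_flatten]

lemma getElem_flatten_replicate {α : Type} (P : List α) (hL : 0 < P.length) (r i : Nat)
    (hi : i < ((List.replicate r P).flatten).length) :
    ((List.replicate r P).flatten)[i] = P[i % P.length]'(Nat.mod_lt _ hL) := by
  induction r generalizing i with
  | zero => simp at hi
  | succ r ih =>
    simp only [List.replicate_succ, List.flatten_cons] at hi ⊢
    by_cases h : i < P.length
    · rw [List.getElem_append_left h]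
      congr 1
      exact (Nat.mod_eq_of_lt h).symm
    · have h : P.length ≤ i := by omega
      rw [List.getElem_append_right h]
      rw [ih (i - P.length) (by simp at hi ⊢; omega)]
      congr 1
      rw [Nat.mod_eq_sub_mod h]

-- pvTileSlice on a pattern whose m-th entry is f(m) equals A's map of f over the residues
lemma tileSlice_eq (P : List Int) (f : Int → Int) (n pre post : Int)
    (hL : 0 < P.length) (hpre : 0 ≤ pre) (hpost : 0 ≤ post) (hn : 0 ≤ n)
    (hP : ∀ (m : Nat) (h : m < P.length), P[m] = f (m : Int)) :
    pvTileSlice P pre (pre + n + post)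
      = ((PySem.List.pyRange (-pre) (n + post) 1).map
          (fun p => PySem.Int.mod p (P.length : Int))).map f := by
  have hLz : (0 : Int) < (P.length : Int) := by exact_mod_cast hL
  set Lz : Int := (P.length : Int) with hLzdef
  set total : Int := pre + n + post with htotal
  have htot0 : 0 ≤ total := by omega
  set start : Int := PySem.Int.mod (-pre) Lz with hstartdef
  have hstart_emod : start = (-pre) % Lz := PySem.Int.mod_eq_emod_of_pos hLz
  have hstart0 : 0 ≤ start := by rw [hstart_emod]; exact Int.emod_nonneg _ (by omega)
  have hstartlt : start < Lz := by rw [hstart_emod]; exact Int.emod_lt_of_pos _ hLz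
  set reps : Int := PySem.Int.floordiv (start + total + Lz - 1) Lz with hrepsdef
  have hreps_ediv : reps = (start + total + Lz - 1) / Lz := PySem.Int.floordiv_eq_ediv_of_pos hLz
  have hkey : start + total ≤ Lz * reps := by
    have h1 := Int.mul_ediv_add_emod (start + total + Lz - 1) Lz
    have h2 := Int.emod_lt_of_pos (start + total + Lz - 1) hLz
    have h3 := Int.emod_nonneg (start + total + Lz - 1) (by omega : Lz ≠ 0)
    rw [hreps_ediv]; linarith
  have hreps0 : 0 ≤ reps := by
    rw [hreps_ediv]; exact Int.ediv_nonneg (by omega) (by omega)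
  have hcast : ((reps.toNat * P.length : Nat) : Int) = Lz * reps := by
    push_cast [Int.toNat_of_nonneg hreps0]; ring
  have hlen_tiled : (PySem.List.pyRepeat P reps).length = reps.toNat * P.length := by
    simp [PySem.List.pyRepeat, length_flatten_replicate P reps.toNat]
  have hfit : start.toNat + total.toNat ≤ reps.toNat * P.length := by
    have : ((start.toNat + total.toNat : Nat) : Int) ≤ ((reps.toNat * P.length : Nat) : Int) := by
      rw [hcast]; push_cast [Int.toNat_of_nonneg hstart0, Int.toNat_of_nonneg htot0]; omega
    exact_mod_cast this
  show PySem.List.slice (PySem.List.pyRepeat P reps) (some start) (some (start + total)) = _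
  rw [PySem.List.slice_toNat _ hstart0 (by omega)]
  have hsub : (start + total).toNat - start.toNat = total.toNat := by omega
  rw [hsub, List.map_map]
  apply List.ext_getElem
  · simp [hlen_tiled, PySem.List.length_pyRange_one]
    omega
  · intro k hk1 hk2
    have hkt : k < total.toNat := by
      simp [hlen_tiled] at hk1; omega
    rw [List.getElem_take, List.getElem_drop]
    rw [List.getElem_map, PySem.List.getElem_pyRange_one]
    have hidx : start.toNat + k < (PySem.List.pyRepeat P reps).length := by
      rw [hlen_tiled]; omega
    show (PySem.List.pyRepeat P reps)[start.toNat + k]'hidx = _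
    refine ((getElem_flatten_replicate P hL reps.toNat (start.toNat + k)
      (by simpa [PySem.List.pyRepeat] using hidx)).trans ?_)
    rw [hP _ (Nat.mod_lt _ hL)]
    simp only [Function.comp]
    congr 1
    rw [PySem.Int.mod_eq_emod_of_pos hLz]
    push_cast [Int.toNat_of_nonneg hstart0]
    rw [← hLzdef, hstart_emod, Int.emod_add_emod]

-- ===== VERDICT (by name: the statement is the Claim_ definition above) =====
theorem pad_axis_indices_py_spec : Claim_equal_pad_axis_indices_py := by
  intro n pre post mode _hdom hprec
  unfold Spec_pad_axis_indices_py
  obtain ⟨hpre0, hpost0, H⟩ := hprec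
  have hneg : ¬(pre < 0 ∨ post < 0) := by omega
  by_cases hpp : pre = 0 ∧ post = 0
  · simp [pad_axis_indices_py, pad_axis_indices_py_alt, hpp]
  · obtain ⟨hn, hmode⟩ := H hpp
    have hnle : ¬ n ≤ 0 := by omega
    rcases hmode with h | h | h | ⟨h, hn2⟩ <;> subst h
    · -- edge
      simp [pad_axis_indices_py, pad_axis_indices_py_alt, hneg, hpp, hnle]
    · -- wrap
      simp only [pad_axis_indices_py, pad_axis_indices_py_alt, if_neg hneg, if_neg hpp, if_neg hnle]
      simp only [String.reduceEq, reduceIte]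
      have hlen : ((PySem.List.pyRange 0 n 1).length : Int) = n := by
        rw [PySem.List.length_pyRange_one]; omega
      rw [tileSlice_eq (PySem.List.pyRange 0 n 1) (fun m => m) n pre post
        (by rw [PySem.List.length_pyRange_one]; omega) hpre0 hpost0 (by omega)
        (by intro m hm; rw [PySem.List.getElem_pyRange_one]; ring)]
      rw [hlen, List.map_id']
    · -- symmetric
      simp only [pad_axis_indices_py, pad_axis_indices_py_alt, if_neg hneg, if_neg hpp, if_neg hnle]
      simp only [String.reduceEq, reduceIte]
      have hClen : (PySem.List.pyRange 0 n 1).length = n.toNat := by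
        rw [PySem.List.length_pyRange_one]; omega
      have hlen : (((PySem.List.pyRange 0 n 1 ++ (PySem.List.pyRange 0 n 1).reverse).length : Nat) : Int) = 2 * n := by
        simp [hClen]; omega
      rw [tileSlice_eq (PySem.List.pyRange 0 n 1 ++ (PySem.List.pyRange 0 n 1).reverse)
        (fun m => if m < n then m else 2 * n - 1 - m) n pre post
        (by simp [hClen]; omega) hpre0 hpost0 (by omega) ?_, hlen]
      intro m hm
      simp only [List.length_append, List.length_reverse, hClen] at hm
      by_cases hcase : m < n.toNat
      · rw [List.getElem_append_left (by rw [hClen]; exact hcase),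
          PySem.List.getElem_pyRange_one]
        beta_reduce
        rw [if_pos (by omega)]
        omega
      · rw [List.getElem_append_right (by rw [hClen]; omega), List.getElem_reverse,
          PySem.List.getElem_pyRange_one]
        beta_reduce
        rw [if_neg (by omega)]
        simp only [hClen]
        omega
    · -- reflect
      have hn1 : ¬ n ≤ 1 := by omega
      simp only [pad_axis_indices_py, pad_axis_indices_py_alt, if_neg hneg, if_neg hpp,
        if_neg hnle, if_neg hn1]
      simp only [String.reduceEq, reduceIte]
      have hClen : (PySem.List.pyRange 0 n 1).length = n.toNat := by
        rw [PySem.List.length_pyRange_one]; omega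
      have hmid : PySem.List.slice (PySem.List.pyRange 0 n 1) (some 1) (some (n - 1))
          = List.take ((n - 1).toNat - 1) (List.drop 1 (PySem.List.pyRange 0 n 1)) := by
        rw [PySem.List.slice_toNat _ (by omega) (by omega)]
        norm_num
      have hmidlen : (PySem.List.slice (PySem.List.pyRange 0 n 1) (some 1) (some (n - 1))).length
          = n.toNat - 2 := by
        rw [hmid]; simp [hClen]; omega
      have hlen : (((PySem.List.pyRange 0 n 1 ++
          (PySem.List.slice (PySem.List.pyRange 0 n 1) (some 1) (some (n - 1))).reverse).length : Nat) : Int)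
          = 2 * n - 2 := by
        simp [hClen, hmidlen]; omega
      rw [tileSlice_eq (PySem.List.pyRange 0 n 1 ++
          (PySem.List.slice (PySem.List.pyRange 0 n 1) (some 1) (some (n - 1))).reverse)
        (fun m => if m < n then m else 2 * n - 2 - m) n pre post
        (by simp [hClen, hmidlen]; omega) hpre0 hpost0 (by omega) ?_, hlen]
      intro m hm
      simp only [List.length_append, List.length_reverse, hClen, hmidlen] at hm
      by_cases hcase : m < n.toNat
      · rw [List.getElem_append_left (by rw [hClen]; exact hcase),
          PySem.List.getElem_pyRange_one]
        beta_reduce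
        rw [if_pos (by omega)]
        omega
      · have hmidget : ∀ (j : Nat) (hj : j < (PySem.List.slice (PySem.List.pyRange 0 n 1)
            (some 1) (some (n - 1))).length),
            (PySem.List.slice (PySem.List.pyRange 0 n 1) (some 1) (some (n - 1)))[j]
              = (1 : Int) + (j : Int) := by
          intro j hj
          rw [List.getElem_of_eq hmid, List.getElem_take, List.getElem_drop,
            PySem.List.getElem_pyRange_one]
          push_cast
          ring
        rw [List.getElem_append_right (by rw [hClen]; omega), List.getElem_reverse, hmidget]
        beta_reduce
        rw [if_neg (by omega)]
        simp only [hmidlen, hClen]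
        omega
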